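-- pv_equiv track=rewrite | github.com/JureZmrzlikar/imaps | imaps/sandbox/kmers.py | pos_count_kmer
-- ===== SOURCE A (Python) =====
-- from itertools import product, combinations
--
-- def pos_count_kmer(seqs, k_length, window, kmer_list=False):
--     """Get number of occurences of each kmer for each position.
--
--     Alternativly, if kmer_list is defined, it returns positional counts
--     only for kmers in the list.
--     """
--     shift = int((k_length + 1) / 2)
--     zero_counts = {pos: 0 for pos in range(-window + shift, window + shift + 1)}
--     if kmer_list:
--         possible_kmers = kmer_list
--     else:
--         possible_kmers = []
--         for i in product('ACGT', repeat=k_length):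
--             possible_kmers.append("".join(i))
--     kmer_pos_count = {x: zero_counts.copy() for x in possible_kmers}
--     for sequence in seqs:
--         for i in range(k_length, len(sequence) - k_length):
--             kmer = sequence[i: i + k_length]
--             relative_pos = i - window - k_length + shift
--             try:
--                 kmer_pos_count[kmer][relative_pos] += 1
--             except KeyError:
--                 pass
--     return kmer_pos_count
-- ===== SOURCE B (Python) =====
-- from itertools import product
--
-- def pos_count_kmer(seqs, k_length, window, kmer_list=False):
--     """Position-major rewrite: each relative position corresponds to exactly one
--     absolute index, so tally one column counter per position over the sequences
--     (skipping positions beyond every sequence), then read the columns out per kmer."""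
--     shift = int((k_length + 1) / 2)
--     if kmer_list:
--         kmers = list(dict.fromkeys(kmer_list))
--     else:
--         kmers = ["".join(p) for p in product('ACGT', repeat=k_length)]
--     maxlen = max(map(len, seqs), default=0)
--     columns = []
--     for pos in range(-window + shift, window + shift + 1):
--         i = pos + window + k_length - shift
--         column = {}
--         if i < maxlen - k_length:
--             for s in seqs:
--                 if i < len(s) - k_length:
--                     km = s[i:i + k_length]
--                     column[km] = column.get(km, 0) + 1
--         columns.append((pos, column))
--     return {km: {pos: column.get(km, 0) for pos, column in columns} for km in kmers}
-- ===== Notes on version B (the rewrite author's own statement) =====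
-- stated objective: alternative
-- what changed: Inverts the loop nest: instead of scanning every index of every sequence and incrementing a pre-zeroed nested dict (discarding out-of-range positions via KeyError), B exploits that each relative position corresponds to exactly one absolute index, builds one column counter per position over the sequences, and then reads the columns out per kmer; out-of-window indices are never visited.
import Mathlib
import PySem

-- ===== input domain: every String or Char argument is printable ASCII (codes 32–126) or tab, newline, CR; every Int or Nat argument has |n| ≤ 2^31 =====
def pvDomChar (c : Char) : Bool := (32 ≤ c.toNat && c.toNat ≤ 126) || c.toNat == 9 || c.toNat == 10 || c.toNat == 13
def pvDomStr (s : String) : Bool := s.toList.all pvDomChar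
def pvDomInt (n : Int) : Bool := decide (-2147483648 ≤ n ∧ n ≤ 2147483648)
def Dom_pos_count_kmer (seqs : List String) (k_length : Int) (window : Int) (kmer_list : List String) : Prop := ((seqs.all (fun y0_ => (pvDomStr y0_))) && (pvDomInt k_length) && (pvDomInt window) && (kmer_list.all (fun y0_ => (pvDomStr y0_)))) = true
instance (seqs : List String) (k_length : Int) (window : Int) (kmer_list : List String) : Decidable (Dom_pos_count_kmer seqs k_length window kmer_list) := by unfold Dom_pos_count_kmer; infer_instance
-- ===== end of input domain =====

-- B inverts the loops: instead of scanning every index of every sequence and incrementing a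
-- pre-zeroed nested dict (dropping out-of-range positions via KeyError), it uses the fact that
-- each relative position corresponds to exactly ONE absolute index, tallies one per-position
-- column counter over the sequences, then reads the columns out per kmer (objective: alternative).

-- ===== PORT A =====
-- itertools.product('ACGT', repeat=n), each tuple joined: first coordinate varies slowest
def pvProdACGT : Nat → List (List Char)
  | 0 => [[]]
  | n + 1 => (['A', 'C', 'G', 'T'].flatMap (fun c => (pvProdACGT n).map (fun t => c :: t)))

def pos_count_kmer (seqs : List String) (k_length : Int) (window : Int) (kmer_list : List String) : List (String × List (Int × Int)) :=
  let shift := PySem.Int.truncdiv (k_length + 1) 2            -- int((k_length + 1) / 2); exact: |k|+1 < 2^53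
  let zero_counts : PySem.Dict Int Int :=
    (PySem.List.pyRange (-window + shift) (window + shift + 1) 1).foldl (fun d p => d.insert p 0) PySem.Dict.empty
  let possible_kmers : List String :=
    if kmer_list ≠ [] then kmer_list
    else (pvProdACGT k_length.toNat).map (fun cs => String.ofList cs)  -- k_length < 0 raises ValueError in Python: outside Pre_
  let kmer_pos_count : PySem.Dict String (PySem.Dict Int Int) :=
    possible_kmers.foldl (fun d x => d.insert x zero_counts) PySem.Dict.empty
  let final := seqs.foldl (fun d sequence =>
    (PySem.List.pyRange k_length (PySem.Str.len sequence - k_length) 1).foldl (fun d i =>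
      let kmer := String.ofList (PySem.List.slice sequence.toList (some i) (some (i + k_length)))
      let relative_pos := i - window - k_length + shift
      match d.get? kmer with                                   -- try: d[kmer][relative_pos] += 1 except KeyError: pass
      | none => d
      | some inner =>
        match inner.get? relative_pos with
        | none => d
        | some v => d.insert kmer (inner.insert relative_pos (v + 1))) d) kmer_pos_count
  final.items.map (fun kv => (kv.1, kv.2.items))

-- ===== PORT B =====
def pos_count_kmer_alt (seqs : List String) (k_length : Int) (window : Int) (kmer_list : List String) : List (String × List (Int × Int)) :=
  let shift := PySem.Int.truncdiv (k_length + 1) 2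
  let kmers : List String :=
    if kmer_list ≠ [] then PySem.List.dedup kmer_list          -- list(dict.fromkeys(kmer_list))
    else (pvProdACGT k_length.toNat).map (fun cs => String.ofList cs)
  let maxlen := seqs.foldl (fun m s => max m (PySem.Str.len s)) 0   -- max(map(len, seqs), default=0)
  let columns : List (Int × PySem.Dict String Int) :=
    (PySem.List.pyRange (-window + shift) (window + shift + 1) 1).foldl (fun acc pos =>
      let i := pos + window + k_length - shift
      acc ++ [(pos,
        if i < maxlen - k_length then
          seqs.foldl (fun c s =>
            if i < PySem.Str.len s - k_length then
              let km := String.ofList (PySem.List.slice s.toList (some i) (some (i + k_length)))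
              c.insert km (c.getD km 0 + 1)
            else c) PySem.Dict.empty
        else PySem.Dict.empty)]) []
  kmers.map (fun km => (km, columns.map (fun pc => (pc.1, pc.2.getD km 0))))

-- ===== PRECONDITION & SPEC =====
-- Pre_ excludes only k_length < 0 with an empty/falsy kmer_list, where A raises ValueError (product with negative repeat).
def Pre_pos_count_kmer (seqs : List String) (k_length : Int) (window : Int) (kmer_list : List String) : Prop :=
  kmer_list ≠ [] ∨ 0 ≤ k_length
instance (seqs : List String) (k_length : Int) (window : Int) (kmer_list : List String) : Decidable (Pre_pos_count_kmer seqs k_length window kmer_list) := by unfold Pre_pos_count_kmer; infer_instance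
def pvWitness_pos_count_kmer : List String × Int × Int × List String := (["AACGTAC"], 1, 2, [])

def Spec_pos_count_kmer (seqs : List String) (k_length : Int) (window : Int) (kmer_list : List String) (out : List (String × List (Int × Int))) : Prop := out = pos_count_kmer_alt seqs k_length window kmer_list
instance (seqs : List String) (k_length : Int) (window : Int) (kmer_list : List String) (out : List (String × List (Int × Int))) : Decidable (Spec_pos_count_kmer seqs k_length window kmer_list out) := by unfold Spec_pos_count_kmer; infer_instance

-- ===== CLAIM (what is proved, stated in full; the proofs are below) =====
def Claim_equal_pos_count_kmer : Prop := ∀ (seqs : List String) (k_length : Int) (window : Int) (kmer_list : List String), Dom_pos_count_kmer seqs k_length window kmer_list → Pre_pos_count_kmer seqs k_length window kmer_list → Spec_pos_count_kmer seqs k_length window kmer_list (pos_count_kmer seqs k_length window kmer_list)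

-- ===== LEMMAS AND PROOFS =====

theorem get?_mk_map {κ ν : Type} [BEq κ] [LawfulBEq κ] [DecidableEq κ] (keys : List κ) (f : κ → ν) (k : κ) :
    (PySem.Dict.mk (keys.map (fun x => (x, f x)))).get? k = if k ∈ keys then some (f k) else none := by
  induction keys with
  | nil => simp [PySem.Dict.get?]
  | cons x xs ih =>
    simp only [List.map_cons, PySem.Dict.get?_mk_cons]
    by_cases h : x = k
    · subst h; simp
    · simp [h, Ne.symm h, ih]

theorem insert_mk_map {κ ν : Type} [BEq κ] [LawfulBEq κ] [DecidableEq κ] (keys : List κ) (f : κ → ν) (k : κ) (v : ν)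
    (hk : k ∈ keys) :
    (PySem.Dict.mk (keys.map (fun x => (x, f x)))).insert k v
      = PySem.Dict.mk (keys.map (fun x => if x = k then (k, v) else (x, f x))) := by
  apply PySem.Dict.ext
  rw [PySem.Dict.items_insert_of_contains]
  · simp only [List.map_map]
    apply List.map_congr_left
    intro a _
    by_cases h : a = k <;> simp [h]
  · rw [PySem.Dict.contains_iff_mem_keys]
    simp [PySem.Dict.keys_mk, List.map_map]
    simpa using hk

-- fold of constant-value inserts from a dedup front
theorem foldl_insert_const {κ ν : Type} [BEq κ] [LawfulBEq κ] [DecidableEq κ] (xs : List κ) (v : ν) :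
    ∀ (ys : List κ), ys.Nodup →
      (xs.foldl (fun d x => d.insert x v) (PySem.Dict.mk (ys.map (fun x => (x, v)))))
        = PySem.Dict.mk ((PySem.Set.update ys xs).map (fun x => (x, v))) := by
  induction xs with
  | nil => intro ys h; simp [PySem.Set.update]
  | cons x xs ih =>
    intro ys h
    simp only [List.foldl_cons]
    by_cases hx : x ∈ ys
    · rw [insert_mk_map ys _ x v hx]
      have : (ys.map fun y => if y = x then (x, v) else (y, v)) = ys.map (fun y => (y, v)) := by
        apply List.map_congr_left; intro a _; by_cases h2 : a = x <;> simp [h2]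
      rw [this, ih ys h]
      rw [PySem.Set.update_cons]
      have : PySem.Set.add ys x = ys := by
        simp [PySem.Set.add, PySem.Set.contains_eq_listContains, hx]
      rw [this]
    · have hfresh : (PySem.Dict.mk (ys.map fun x => (x, v))).contains x = false := by
        simp [PySem.Dict.contains_eq_decide_mem_keys, PySem.Dict.keys_mk, List.map_map]
        simpa using hx
      rw [show (PySem.Dict.mk (ys.map fun y => (y, v))).insert x v
            = PySem.Dict.mk ((ys ++ [x]).map fun y => (y, v)) from by
        apply PySem.Dict.ext
        rw [PySem.Dict.items_insert_of_not_contains _ _ hfresh]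
        simp]
      rw [ih (ys ++ [x]) (by simp [List.nodup_append, h]; exact fun a ha hax => hx (hax ▸ ha))]
      congr 2
      rw [PySem.Set.update_cons]
      have : PySem.Set.add ys x = ys ++ [x] := by
        simp [PySem.Set.add, PySem.Set.contains_eq_listContains, hx]
      rw [this]

def pvStepA (d : PySem.Dict String (PySem.Dict Int Int)) (x : String × Int) : PySem.Dict String (PySem.Dict Int Int) :=
  match d.get? x.1 with
  | none => d
  | some inner =>
    match inner.get? x.2 with
    | none => d
    | some v => d.insert x.1 (inner.insert x.2 (v + 1))

def pvInner (positions : List Int) (L : List (String × Int)) (km : String) : PySem.Dict Int Int :=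
  PySem.Dict.mk (positions.map (fun p => (p, (L.count (km, p) : Int))))

def pvModel (kmers : List String) (positions : List Int) (L : List (String × Int)) : PySem.Dict String (PySem.Dict Int Int) :=
  PySem.Dict.mk (kmers.map (fun km => (km, pvInner positions L km)))

theorem pvCount_ne {x y : String × Int} (L : List (String × Int)) (h : y ≠ x) :
    (L ++ [x]).count y = L.count y := by
  rw [List.count_append, List.count_eq_zero.mpr (fun hm => h (List.mem_singleton.mp hm)), Nat.add_zero]

theorem pvInner_irrel (positions : List Int) (L : List (String × Int)) (x : String × Int) (km : String)
    (h : km ≠ x.1) : pvInner positions (L ++ [x]) km = pvInner positions L km := by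
  unfold pvInner
  congr 1
  apply List.map_congr_left
  intro p _
  rw [pvCount_ne L (fun he => h (congrArg Prod.fst he))]

theorem pvInner_irrel' (positions : List Int) (L : List (String × Int)) (km : String) (p : Int)
    (hp : p ∉ positions) : pvInner positions (L ++ [(km, p)]) km = pvInner positions L km := by
  unfold pvInner
  congr 1
  apply List.map_congr_left
  intro q hq
  rw [pvCount_ne L (fun he => hp (by injection he with h1 h2; exact h2 ▸ hq))]

theorem pvStepA_model (kmers : List String) (positions : List Int) (L : List (String × Int)) (x : String × Int) :
    pvStepA (pvModel kmers positions L) x = pvModel kmers positions (L ++ [x]) := by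
  obtain ⟨km, p⟩ := x
  unfold pvStepA pvModel
  rw [get?_mk_map kmers (fun km => pvInner positions L km) km]
  by_cases hkm : km ∈ kmers
  · rw [if_pos hkm]
    simp only
    rw [show pvInner positions L km = PySem.Dict.mk (positions.map (fun q => (q, (fun q => ((L.count (km, q) : Nat) : Int)) q))) from rfl]
    rw [get?_mk_map positions (fun q => ((L.count (km, q) : Nat) : Int)) p]
    by_cases hp : p ∈ positions
    · rw [if_pos hp]
      show (PySem.Dict.mk (kmers.map fun km' => (km', pvInner positions L km'))).insert km
          ((PySem.Dict.mk (positions.map fun q => (q, (fun q => ((L.count (km, q) : Nat) : Int)) q))).insert p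
            (((L.count (km, p) : Nat) : Int) + 1)) = _
      rw [insert_mk_map positions _ p _ hp]
      rw [insert_mk_map kmers _ km _ hkm]
      congr 1
      apply List.map_congr_left
      intro a _
      by_cases ha : a = km
      · subst ha
        rw [if_pos rfl]
        unfold pvInner
        congr 2
        apply List.map_congr_left
        intro q _
        by_cases hq : q = p
        · subst hq
          simp [List.count_append]
        · rw [if_neg hq, pvCount_ne L (by simp [hq])]
      · rw [if_neg ha, pvInner_irrel positions L (km, p) a ha]
    · rw [if_neg hp]
      show PySem.Dict.mk (kmers.map fun km' => (km', pvInner positions L km')) = _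
      congr 1
      apply List.map_congr_left
      intro a _
      by_cases ha : a = km
      · subst ha
        rw [pvInner_irrel' positions L a p hp]
      · rw [pvInner_irrel positions L (km, p) a ha]
  · rw [if_neg hkm]
    show PySem.Dict.mk (kmers.map fun km' => (km', pvInner positions L km')) = _
    congr 1
    apply List.map_congr_left
    intro a ha
    rw [pvInner_irrel positions L (km, p) a (fun h => hkm ((show a = km from h) ▸ ha))]

theorem pvFoldA (kmers : List String) (positions : List Int) :
    ∀ (L L0 : List (String × Int)),
      L.foldl pvStepA (pvModel kmers positions L0) = pvModel kmers positions (L0 ++ L) := by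
  intro L
  induction L with
  | nil => intro L0; simp
  | cons x L ih =>
    intro L0
    simp only [List.foldl_cons]
    rw [pvStepA_model, ih]
    congr 1
    simp

-- characterization pieces used only by the proofs
def pvPairsOf (k w shift : Int) (s : String) : List (String × Int) :=
  (PySem.List.pyRange k (PySem.Str.len s - k) 1).map
    (fun i => (String.ofList (PySem.List.slice s.toList (some i) (some (i + k))), i - w - k + shift))

theorem foldl_insert_const_empty {κ ν : Type} [BEq κ] [LawfulBEq κ] [DecidableEq κ] (xs : List κ) (v : ν) :
    xs.foldl (fun d x => d.insert x v) PySem.Dict.empty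
      = PySem.Dict.mk ((PySem.List.dedup xs).map (fun x => (x, v))) := by
  have h := foldl_insert_const xs v [] (by simp)
  simpa [PySem.List.dedup_eq_ofList, PySem.Set.ofList_eq_foldl, PySem.Set.update] using h

theorem initA_eq (kmers : List String) (positions : List Int) (hpos : positions.Nodup) :
    kmers.foldl (fun d x => d.insert x (positions.foldl (fun d p => d.insert p (0 : Int)) PySem.Dict.empty)) PySem.Dict.empty
      = pvModel (PySem.List.dedup kmers) positions [] := by
  have hz : positions.foldl (fun d p => d.insert p (0 : Int)) PySem.Dict.empty
      = PySem.Dict.mk (positions.map (fun p => (p, (0 : Int)))) := by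
    apply PySem.Dict.ext
    rw [PySem.Dict.items_foldl_insert_fresh positions (fun p => p) (fun _ => 0) PySem.Dict.empty
      (fun a _ => PySem.Dict.contains_empty a) (by simpa using hpos)]
    simp [PySem.Dict.empty]
  rw [hz, foldl_insert_const_empty]
  unfold pvModel pvInner
  simp

theorem loopA_eq (k w shift : Int) (seqs : List String) (d0 : PySem.Dict String (PySem.Dict Int Int)) :
    seqs.foldl (fun d sequence =>
      (PySem.List.pyRange k (PySem.Str.len sequence - k) 1).foldl (fun d i =>
        match d.get? (String.ofList (PySem.List.slice sequence.toList (some i) (some (i + k)))) with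
        | none => d
        | some inner =>
          match inner.get? (i - w - k + shift) with
          | none => d
          | some v => d.insert (String.ofList (PySem.List.slice sequence.toList (some i) (some (i + k))))
              (inner.insert (i - w - k + shift) (v + 1))) d) d0
      = (seqs.flatMap (pvPairsOf k w shift)).foldl pvStepA d0 := by
  rw [List.foldl_flatMap]
  apply PySem.List.foldl_congr_mem
  intro d s _
  unfold pvPairsOf
  rw [List.foldl_map]
  rfl

theorem pvProdACGT_nodup (n : Nat) : (pvProdACGT n).Nodup := by
  induction n with
  | zero => simp [pvProdACGT]
  | succ n ih =>
    rw [pvProdACGT, List.nodup_flatMap]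
    have hdis : ∀ c d : Char, c ≠ d →
        List.Disjoint ((pvProdACGT n).map (fun t => c :: t)) ((pvProdACGT n).map (fun t => d :: t)) := by
      intro c d hcd x hx hy
      obtain ⟨t, _, rfl⟩ := List.mem_map.mp hx
      obtain ⟨u, _, he⟩ := List.mem_map.mp hy
      exact hcd (by injection he with h1 h2; exact h1.symm)
    refine ⟨fun c _ => ih.map (fun a b h => by injection h), ?_⟩
    refine List.Pairwise.cons ?_ (List.Pairwise.cons ?_ (List.Pairwise.cons ?_ (List.Pairwise.cons ?_ List.Pairwise.nil)))
    · intro c hc; fin_cases hc <;> exact hdis _ _ (by decide)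
    · intro c hc; fin_cases hc <;> exact hdis _ _ (by decide)
    · intro c hc; fin_cases hc <;> exact hdis _ _ (by decide)
    · intro c hc; exact absurd hc (List.not_mem_nil)

theorem kmers_align (k : Int) (kl : List String) :
    PySem.List.dedup (if kl ≠ [] then kl else (pvProdACGT k.toNat).map (fun cs => String.ofList cs))
      = (if kl ≠ [] then PySem.List.dedup kl else (pvProdACGT k.toNat).map (fun cs => String.ofList cs)) := by
  by_cases h : kl = []
  · simp only [h, ne_eq, not_true_eq_false, if_false]
    rw [PySem.List.dedup_eq_ofList, PySem.Set.ofList_eq_self_of_nodup]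
    exact (pvProdACGT_nodup k.toNat).map (fun a b hab => String.ofList_inj.mp hab)
  · simp [h]

-- ===== B-side lemmas: one column per relative position =====

theorem count_flatMap_sum {α β : Type} [BEq β] (l : List α) (f : α → List β) (v : β) :
    (l.flatMap f).count v = (l.map (fun x => (f x).count v)).sum := by
  induction l with
  | nil => simp
  | cons x l ih => simp [List.count_append, ih]

theorem sum_ite_eq_countP {α : Type} (l : List α) (p : α → Bool) :
    (l.map (fun x => if p x then (1 : Nat) else 0)).sum = l.countP p := by
  induction l with
  | nil => simp
  | cons x l ih =>
    simp only [List.map_cons, List.sum_cons, List.countP_cons, ih]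
    by_cases h : p x <;> simp [h] <;> omega

-- count of (km, pos) among the pairs of one sequence: the position pins the single index i₀
theorem pairs_count_eq (k w shift : Int) (s : String) (km : String) (pos : Int)
    (hpos : -w + shift ≤ pos) :
    (pvPairsOf k w shift s).count (km, pos)
      = (if pos + w + k - shift < PySem.Str.len s - k ∧
            String.ofList (PySem.List.slice s.toList (some (pos + w + k - shift)) (some (pos + w + k - shift + k))) = km
         then 1 else 0) := by
  set i₀ := pos + w + k - shift with hi₀
  set sl : Int → String := fun i => String.ofList (PySem.List.slice s.toList (some i) (some (i + k))) with hsl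
  unfold pvPairsOf
  simp only [List.count, List.countP_map, Function.comp_def]
  rw [List.countP_congr (q := fun i => (i == i₀) && decide (sl i₀ = km))
    (by
      intro i _
      by_cases hii : i = i₀
      · subst hii
        have harith : i₀ - w - k + shift = pos := by omega
        simp [hsl, harith]
      · have : ¬ (i - w - k + shift = pos) := by omega
        simp [hii, this])]
  by_cases hc : sl i₀ = km
  · simp only [hc, decide_true, Bool.and_true]
    have hcnt : (PySem.List.pyRange k (PySem.Str.len s - k) 1).countP (fun i => i == i₀)
        = (PySem.List.pyRange k (PySem.Str.len s - k) 1).count i₀ := rfl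
    rw [hcnt]
    by_cases hm : i₀ < PySem.Str.len s - k
    · rw [List.count_eq_one_of_mem (PySem.List.nodup_pyRange_one _ _)
        ((PySem.List.mem_pyRange_one).mpr ⟨by omega, hm⟩)]
      exact (if_pos ⟨hm, hc⟩).symm
    · rw [List.count_eq_zero_of_not_mem (fun h => hm ((PySem.List.mem_pyRange_one).mp h).2)]
      exact (if_neg (fun h => hm h.1)).symm
  · simp only [hc, decide_false, Bool.and_false, List.countP_false]
    exact (if_neg (fun h => hc h.2)).symm

-- the per-position column counter read at km equals the global pair count at (km, pos)
theorem col_count (k w shift : Int) (seqs : List String) (km : String) (pos : Int)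
    (hpos : -w + shift ≤ pos) :
    (seqs.foldl (fun c s =>
        if pos + w + k - shift < PySem.Str.len s - k then
          c.insert (String.ofList (PySem.List.slice s.toList (some (pos + w + k - shift)) (some (pos + w + k - shift + k))))
            (c.getD (String.ofList (PySem.List.slice s.toList (some (pos + w + k - shift)) (some (pos + w + k - shift + k)))) 0 + 1)
        else c) PySem.Dict.empty).getD km 0
      = ((seqs.flatMap (pvPairsOf k w shift)).count (km, pos) : Int) := by
  rw [PySem.List.foldl_ite_eq_foldl_filter]
  have hkey := PySem.Dict.getD_foldl_insert_add_one
    (l := (seqs.filter (fun s => decide (pos + w + k - shift < PySem.Str.len s - k))).map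
      (fun s => String.ofList (PySem.List.slice s.toList (some (pos + w + k - shift)) (some (pos + w + k - shift + k)))))
    (v := km) (d := PySem.Dict.empty)
  rw [List.foldl_map] at hkey
  rw [hkey, PySem.Dict.getD_empty, zero_add]
  rw [count_flatMap_sum]
  rw [List.map_congr_left (fun s _ => pairs_count_eq k w shift s km pos hpos)]
  norm_cast
  rw [show (fun s => if pos + w + k - shift < PySem.Str.len s - k ∧
          String.ofList (PySem.List.slice s.toList (some (pos + w + k - shift)) (some (pos + w + k - shift + k))) = km
        then (1 : Nat) else 0)
      = (fun s => if (decide (pos + w + k - shift < PySem.Str.len s - k) &&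
          (String.ofList (PySem.List.slice s.toList (some (pos + w + k - shift)) (some (pos + w + k - shift + k))) == km))
        then (1 : Nat) else 0) from by
    funext s
    by_cases h1 : pos + w + k - shift < PySem.Str.len s - k <;>
      by_cases h2 : String.ofList (PySem.List.slice s.toList (some (pos + w + k - shift)) (some (pos + w + k - shift + k))) = km <;>
      simp [h1, h2]]
  rw [sum_ite_eq_countP]
  simp only [List.count, List.countP_map, List.countP_filter]
  apply List.countP_congr
  intro s _
  simp [Function.comp_def, Bool.and_comm]

-- guarded version: positions beyond every sequence contribute an empty column (all counts 0)
theorem col_count_guard (k w shift maxlen : Int) (seqs : List String) (km : String) (pos : Int)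
    (hpos : -w + shift ≤ pos) (hml : ∀ s ∈ seqs, PySem.Str.len s ≤ maxlen) :
    ((if pos + w + k - shift < maxlen - k then
        seqs.foldl (fun c s =>
          if pos + w + k - shift < PySem.Str.len s - k then
            c.insert (String.ofList (PySem.List.slice s.toList (some (pos + w + k - shift)) (some (pos + w + k - shift + k))))
              (c.getD (String.ofList (PySem.List.slice s.toList (some (pos + w + k - shift)) (some (pos + w + k - shift + k)))) 0 + 1)
          else c) PySem.Dict.empty
      else PySem.Dict.empty) : PySem.Dict String Int).getD km 0
      = ((seqs.flatMap (pvPairsOf k w shift)).count (km, pos) : Int) := by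
  by_cases hg : pos + w + k - shift < maxlen - k
  · rw [if_pos hg]
    exact col_count k w shift seqs km pos hpos
  · rw [if_neg hg, PySem.Dict.getD_empty]
    rw [count_flatMap_sum]
    rw [List.map_congr_left (fun s hs => (pairs_count_eq k w shift s km pos hpos).trans
      (if_neg (fun h => hg (by have := hml s hs; omega))))]
    simp

-- ===== VERDICT (by name: the statement is the Claim_ definition above) =====
theorem pos_count_kmer_spec : Claim_equal_pos_count_kmer := by
  intro seqs k w kl _ _
  unfold Spec_pos_count_kmer
  simp only [pos_count_kmer, pos_count_kmer_alt]
  rw [loopA_eq, initA_eq _ _ (PySem.List.nodup_pyRange_one _ _), pvFoldA, kmers_align]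
  rw [PySem.List.foldl_append_singleton_eq_map]
  simp only [List.nil_append]
  unfold pvModel pvInner
  simp only [List.map_map]
  apply List.map_congr_left
  intro km _
  refine congrArg (Prod.mk km) ?_
  apply List.map_congr_left
  intro p hp
  have hple := ((PySem.List.mem_pyRange_one).mp hp).1
  refine congrArg (Prod.mk p) ?_
  exact (col_count_guard k w (PySem.Int.truncdiv (k + 1) 2)
    (seqs.foldl (fun m s => max m (PySem.Str.len s)) 0) seqs km p hple
    (PySem.List.le_foldl_max_int seqs (fun s => PySem.Str.len s) 0).2).symm

theorem pvWitness_ok : Dom_pos_count_kmer (pvWitness_pos_count_kmer.1) (pvWitness_pos_count_kmer.2.1) (pvWitness_pos_count_kmer.2.2.1) (pvWitness_pos_count_kmer.2.2.2) ∧ Pre_pos_count_kmer (pvWitness_pos_count_kmer.1) (pvWitness_pos_count_kmer.2.1) (pvWitness_pos_count_kmer.2.2.1) (pvWitness_pos_count_kmer.2.2.2) := by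
  constructor
  · decide
  · right; decide
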